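-- pv_equiv track=rewrite | github.com/arjun343theboss/GDSC_ML | q1.py | check_characters_present
-- ===== SOURCE A (Python) =====
-- def check_characters_present(string1, string2):
--
--     string1 = string1.lower()
--     string2 = string2.lower()
--
--
--     set_string2 = set(string2)
--
--     for char in string1:
--         if char not in set_string2:
--             return "No"
--
--     return "Yes"
-- ===== SOURCE B (Python) =====
-- def check_characters_present(string1, string2):
--     s2 = set(string2.lower())
--     return "Yes" if len(s2 | set(string1.lower())) == len(s2) else "No"
-- ===== Notes on version B (the rewrite author's own statement) =====
-- stated objective: alternative
-- what changed: Replaces A's per-character Python loop with membership tests and early return by a cardinality argument: string1's characters are all present iff unioning them into string2's character set does not grow it, so B compares len(s2 | set(s1)) with len(s2) and never tests membership of any individual character.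
import Mathlib
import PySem

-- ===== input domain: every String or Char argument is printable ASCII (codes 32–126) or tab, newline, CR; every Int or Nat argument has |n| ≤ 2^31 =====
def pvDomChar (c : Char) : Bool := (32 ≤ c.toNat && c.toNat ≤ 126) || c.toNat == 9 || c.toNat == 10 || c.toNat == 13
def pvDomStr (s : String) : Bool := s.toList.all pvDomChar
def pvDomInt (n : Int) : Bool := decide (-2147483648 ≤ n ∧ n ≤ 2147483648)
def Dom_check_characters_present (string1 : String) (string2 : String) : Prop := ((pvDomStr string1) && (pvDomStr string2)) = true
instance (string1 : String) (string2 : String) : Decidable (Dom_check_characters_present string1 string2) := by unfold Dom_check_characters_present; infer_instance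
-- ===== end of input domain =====

-- ===== PORT A =====
-- B decides the same question by cardinality (does unioning s1's chars grow s2's set?)
-- instead of A's per-character membership loop with early return (objective: alternative).
def pvLoopA : List Char → PySem.Set Char → String
  | [], _ => "Yes"
  | c :: rest, s => if PySem.Set.contains s c then pvLoopA rest s else "No"

def check_characters_present (string1 : String) (string2 : String) : String :=
  let s1 := PySem.Str.lower string1
  let s2 := PySem.Str.lower string2
  let set_string2 : PySem.Set Char := PySem.Set.ofList s2.toList
  pvLoopA s1.toList set_string2

-- ===== PORT B =====
def check_characters_present_alt (string1 : String) (string2 : String) : String :=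
  let s2 : PySem.Set Char := PySem.Set.ofList (PySem.Str.lower string2).toList
  if PySem.Set.len (PySem.Set.union s2 (PySem.Set.ofList (PySem.Str.lower string1).toList))
       == PySem.Set.len s2
  then "Yes" else "No"

-- ===== PRECONDITION & SPEC =====
def Spec_check_characters_present (string1 : String) (string2 : String) (out : String) : Prop := out = check_characters_present_alt string1 string2
instance (string1 : String) (string2 : String) (out : String) : Decidable (Spec_check_characters_present string1 string2 out) := by unfold Spec_check_characters_present; infer_instance

-- ===== CLAIM =====
def Claim_equal_check_characters_present : Prop := ∀ (string1 : String) (string2 : String), Dom_check_characters_present string1 string2 → Spec_check_characters_present string1 string2 (check_characters_present string1 string2)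

-- ===== LEMMAS AND PROOFS =====

lemma pvLoopA_eq (l : List Char) (s : PySem.Set Char) :
    pvLoopA l s = if ∀ c ∈ l, c ∈ s then "Yes" else "No" := by
  induction l with
  | nil => simp [pvLoopA]
  | cons c rest ih =>
    simp only [pvLoopA, ih, List.mem_cons, PySem.Set.contains_iff]
    by_cases h : c ∈ s <;> simp [h]

lemma pv_len_add (s : PySem.Set Char) (x : Char) :
    (PySem.Set.add s x).length = if x ∈ s then s.length else s.length + 1 := by
  simp only [PySem.Set.add, PySem.Set.contains_iff]
  split_ifs <;> simp_all

lemma pv_len_foldl_le (l : List Char) (s : PySem.Set Char) :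
    s.length ≤ (l.foldl PySem.Set.add s).length := by
  induction l generalizing s with
  | nil => simp
  | cons x rest ih =>
    refine le_trans ?_ (ih (PySem.Set.add s x))
    rw [pv_len_add]; split_ifs <;> omega

lemma pv_len_foldl_eq_iff (l : List Char) (s : PySem.Set Char) :
    (l.foldl PySem.Set.add s).length = s.length ↔ ∀ x ∈ l, x ∈ s := by
  induction l generalizing s with
  | nil => simp
  | cons x rest ih =>
    simp only [List.foldl_cons, List.mem_cons]
    by_cases h : x ∈ s
    · have hadd : PySem.Set.add s x = s := by
        simp [PySem.Set.add, h]
      rw [hadd, ih]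
      constructor
      · intro hall; exact fun y hy => hy.elim (fun e => e ▸ h) (hall y)
      · intro hall y hy; exact hall y (Or.inr hy)
    · have hlen : (PySem.Set.add s x).length = s.length + 1 := by
        rw [pv_len_add]; simp [h]
      constructor
      · intro heq
        have := pv_len_foldl_le rest (PySem.Set.add s x)
        omega
      · intro hall; exact absurd (hall x (Or.inl rfl)) h

lemma pv_final (l1 l2 : List Char) :
    pvLoopA l1 (PySem.Set.ofList l2) =
      if PySem.Set.len (PySem.Set.union (PySem.Set.ofList l2) (PySem.Set.ofList l1))
           == PySem.Set.len (PySem.Set.ofList l2)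
      then "Yes" else "No" := by
  rw [pvLoopA_eq]
  have hiff : ((PySem.Set.union (PySem.Set.ofList l2) (PySem.Set.ofList l1)).length
      = (PySem.Set.ofList l2).length) ↔ (∀ c ∈ l1, c ∈ PySem.Set.ofList l2) := by
    rw [show PySem.Set.union (PySem.Set.ofList l2) (PySem.Set.ofList l1)
        = (PySem.Set.ofList l1).foldl PySem.Set.add (PySem.Set.ofList l2) from rfl,
      pv_len_foldl_eq_iff]
    constructor
    · intro h c hc; exact h c (by simp [PySem.Set.mem_ofList, hc])
    · intro h x hx; exact h x (by simpa [PySem.Set.mem_ofList] using hx)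
  simp only [PySem.Set.len, beq_iff_eq, Nat.cast_inj]
  by_cases h : ∀ c ∈ l1, c ∈ PySem.Set.ofList l2
  · rw [if_pos h, if_pos (hiff.mpr h)]
  · rw [if_neg h, if_neg (fun he => h (hiff.mp he))]

-- ===== VERDICT =====
theorem check_characters_present_spec : Claim_equal_check_characters_present := by
  intro string1 string2 _
  unfold Spec_check_characters_present check_characters_present check_characters_present_alt
  exact pv_final (PySem.Str.lower string1).toList (PySem.Str.lower string2).toList
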